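-- pv_equiv track=rewrite | github.com/letmeloveyou82/Algorithm | Python/Programmers/탐욕법(Greedy)/110 옮기기.py | solution
-- ===== SOURCE A (Python) =====
-- def solution(s):
--     answer = []
--     for str in s:
--         cnt, idx, stack = 0, 0, ""
--         while idx < len(str): # 110 찾기
--             if str[idx] == "0" and stack[-2:] == "11":
--                 stack = stack[:-2]
--                 cnt += 1
--             else:
--                 stack += str[idx]
--             idx += 1
--
--         idx = stack.find("111") # 110이 빠진 str에서 111 찾기
--         if idx == -1: # 0 뒤에 110 반복해 붙이기
--             idx = stack.rfind('0')
--             stack = stack[:idx+1] + "110"*cnt + stack[idx+1:]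
--         else: # 111 앞에 110 반복해 붙이기
--             stack = stack[:idx] + "110"*cnt + stack[idx:]
--         answer.append(stack)
--     return answer
-- ===== SOURCE B (Python) =====
-- def solution(s):
--     answer = []
--     for t in s:
--         cnt = ones = 0          # ones = length of the current trailing run of '1's
--         pieces = []             # flushed (non-trailing) part of the reduced string
--         blen = 0                # total length of the flushed part
--         triple = -1             # index of the first "111" inside the flushed part
--         zero = -1               # index of the last '0' inside the flushed part
--         for ch in t:
--             if ch == '1':
--                 ones += 1
--             elif ch == '0' and ones >= 2:
--                 ones -= 2
--                 cnt += 1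
--             else:
--                 if triple == -1 and ones >= 3:
--                     triple = blen
--                 if ones:
--                     pieces.append('1' * ones)
--                 pieces.append(ch)
--                 blen += ones + 1
--                 if ch == '0':
--                     zero = blen - 1
--                 ones = 0
--         if triple != -1:
--             pos = triple
--         elif ones >= 3:
--             pos = blen
--         else:
--             pos = zero + 1
--         base = ''.join(pieces)
--         answer.append(base[:pos] + '110' * cnt + base[pos:] + '1' * ones)
--     return answer
-- ===== Notes on version B (the rewrite author's own statement) =====
-- stated objective: alternative
-- what changed: B never builds or pops a stack and never rescans the reduced string: one forward pass keeps only a counter of the current trailing run of '1's (a '0' cancelling "11" is counter arithmetic), flushes completed runs into an output buffer, and tracks the first-"111" and last-'0' insertion indices on the fly, so A's pop-by-slicing and the post-hoc find("111")/rfind('0') passes disappear.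
import Mathlib
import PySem

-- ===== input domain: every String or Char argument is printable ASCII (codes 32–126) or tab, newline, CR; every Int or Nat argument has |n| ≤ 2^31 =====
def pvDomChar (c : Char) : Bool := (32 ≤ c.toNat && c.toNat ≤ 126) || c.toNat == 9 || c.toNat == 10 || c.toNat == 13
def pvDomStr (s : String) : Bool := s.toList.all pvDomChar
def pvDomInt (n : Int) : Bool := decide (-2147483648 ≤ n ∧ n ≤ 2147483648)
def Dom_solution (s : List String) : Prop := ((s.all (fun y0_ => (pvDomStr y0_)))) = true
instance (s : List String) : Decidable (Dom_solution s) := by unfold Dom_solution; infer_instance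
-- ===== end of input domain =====

-- B replaces A's pop-based stack plus two post-hoc string scans (find("111"), rfind('0'))
-- by ONE forward pass that never pops: it keeps only a counter of the current trailing
-- run of '1's (a '0' cancelling "11" is pure arithmetic on that counter) and tracks the
-- insertion-relevant indices (first "111", last '0') on the fly; objective: alternative
-- (a genuinely different mechanism, not measured faster on the generated inputs).

-- ===== PORT A =====
-- state of A's while-loop: (cnt, stack); stack is a Python string, modelled as its char list
def solutionStepA (p : Nat × List Char) (c : Char) : Nat × List Char :=
  if c = '0' ∧ PySem.List.slice p.2 (some (-2)) none = ['1', '1'] then   -- stack[-2:] == "11"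
    (p.1 + 1, PySem.List.slice p.2 none (some (-2)))                     -- stack = stack[:-2]
  else
    (p.1, p.2 ++ [c])                                                    -- stack += str[idx]

def solutionOneA (t : String) : String :=
  let st0 := t.toList.foldl solutionStepA (0, [])
  let cnt := st0.1
  let stack := st0.2
  let rep := (List.replicate cnt ['1', '1', '0']).flatten   -- "110"*cnt
  let f := PySem.Chars.find stack ['1', '1', '1']
  if f = -1 then
    let r := PySem.Chars.rfind stack ['0']
    String.ofList (PySem.List.slice stack none (some (r + 1)) ++ rep ++
                   PySem.List.slice stack (some (r + 1)) none)
  else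
    String.ofList (PySem.List.slice stack none (some f) ++ rep ++
                   PySem.List.slice stack (some f) none)

def solution (s : List String) : List String :=
  s.foldl (fun acc t => acc ++ [solutionOneA t]) []

-- ===== PORT B =====
-- state of B's single pass: cnt, ones (current trailing run of '1's), pieces (flushed
-- part as list of strings), blen (its length), triple (first "111" index in the flushed
-- part, -1 if none), zero (last '0' index in the flushed part, -1 if none)
structure BSt where
  cnt : Nat
  ones : Nat
  pieces : List String
  blen : Nat
  triple : Int
  zero : Int
deriving Repr, DecidableEq

def solutionStepB (st : BSt) (ch : Char) : BSt :=
  if ch = '1' then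
    { st with ones := st.ones + 1 }
  else if ch = '0' ∧ 2 ≤ st.ones then
    { st with cnt := st.cnt + 1, ones := st.ones - 2 }
  else
    let triple := if st.triple = -1 ∧ 3 ≤ st.ones then (st.blen : Int) else st.triple
    let pieces := (if st.ones ≠ 0 then
                     st.pieces ++ [String.ofList (List.replicate st.ones '1')]
                   else st.pieces) ++ [String.ofList [ch]]
    let blen := st.blen + st.ones + 1
    let zero := if ch = '0' then (blen : Int) - 1 else st.zero
    { cnt := st.cnt, ones := 0, pieces := pieces, blen := blen, triple := triple, zero := zero }

def solutionOneB (t : String) : String :=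
  let st := t.toList.foldl solutionStepB ⟨0, 0, [], 0, -1, -1⟩
  let pos : Int := if st.triple ≠ -1 then st.triple
                   else if 3 ≤ st.ones then (st.blen : Int)
                   else st.zero + 1
  let base := (PySem.Str.join "" st.pieces).toList          -- ''.join(pieces)
  String.ofList (PySem.List.slice base none (some pos) ++
                 (List.replicate st.cnt ['1', '1', '0']).flatten ++
                 PySem.List.slice base (some pos) none ++
                 List.replicate st.ones '1')

def solution_alt (s : List String) : List String :=
  s.foldl (fun acc t => acc ++ [solutionOneB t]) []

-- ===== PRECONDITION & SPEC =====
def Spec_solution (s : List String) (out : List String) : Prop := out = solution_alt s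
instance (s : List String) (out : List String) : Decidable (Spec_solution s out) := by unfold Spec_solution; infer_instance

-- ===== CLAIM (what is proved, stated in full; the proofs are below) =====
def Claim_equal_solution : Prop := ∀ (s : List String), Dom_solution s → Spec_solution s (solution s)

-- ===== LEMMAS AND PROOFS =====

-- ''.join over char lists is flatten
theorem join_nil_flatten (xss : List (List Char)) : PySem.Chars.join [] xss = xss.flatten := by
  induction xss with
  | nil => simp [PySem.Chars.join_nil]
  | cons a t ih =>
    cases t with
    | nil => simp [PySem.Chars.join_singleton]
    | cons b r => rw [PySem.Chars.join_cons_cons, ih]; simp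

-- the flushed part of a B-state, as a char list
def baseOf (st : BSt) : List Char := (st.pieces.map String.toList).flatten

-- "111" occurs at index j
def occ3 (l : List Char) (j : Nat) : Prop :=
  l[j]? = some '1' ∧ l[j + 1]? = some '1' ∧ l[j + 2]? = some '1'

-- v is Python's l.find("111")
def TripleInv (l : List Char) (v : Int) : Prop :=
  (v = -1 ∧ ∀ j, ¬ occ3 l j) ∨
  (∃ k : Nat, v = (k : Int) ∧ occ3 l k ∧ ∀ j < k, ¬ occ3 l j)

-- v is Python's l.rfind("0")
def ZeroInv (l : List Char) (v : Int) : Prop :=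
  (v = -1 ∧ ∀ j : Nat, l[j]? ≠ some '0') ∨
  (∃ k : Nat, v = (k : Int) ∧ l[k]? = some '0' ∧ ∀ j : Nat, k < j → l[j]? ≠ some '0')

-- the fold invariant relating A's (cnt, stack) to B's state
def ABInv (a : Nat × List Char) (b : BSt) : Prop :=
  a.1 = b.cnt ∧
  a.2 = baseOf b ++ List.replicate b.ones '1' ∧
  b.blen = (baseOf b).length ∧
  (∀ j : Nat, j + 1 = (baseOf b).length → (baseOf b)[j]? ≠ some '1') ∧
  TripleInv (baseOf b) b.triple ∧
  ZeroInv (baseOf b) b.zero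

-- getElem? through "base ++ ones '1's ++ rest"
theorem getE (l rest : List Char) (n i : Nat) :
    (l ++ (List.replicate n '1' ++ rest))[i]? =
      if i < l.length then l[i]?
      else if i < l.length + n then some '1'
      else rest[i - l.length - n]? := by
  by_cases h1 : i < l.length
  · rw [List.getElem?_append_left h1, if_pos h1]
  · rw [List.getElem?_append_right (by omega), if_neg h1]
    by_cases h2 : i < l.length + n
    · rw [List.getElem?_append_left (by simp; omega), if_pos h2, List.getElem?_replicate,
        if_pos (by omega)]
    · rw [List.getElem?_append_right (by simp; omega), if_neg h2]
      simp

-- occurrences of "111" in base ++ run ++ [c] (c ≠ '1', base does not end in '1')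
theorem occ3_ext (l : List Char) (n : Nat) (rest : List Char)
    (hl : ∀ j : Nat, j + 1 = l.length → l[j]? ≠ some '1')
    (hr : rest = [] ∨ ∃ c, rest = [c] ∧ c ≠ '1') (j : Nat) :
    occ3 (l ++ (List.replicate n '1' ++ rest)) j ↔
      (occ3 l j ∨ (l.length ≤ j ∧ j + 3 ≤ l.length + n)) := by
  have hrest : ∀ i : Nat, rest[i]? ≠ some '1' := by
    intro i
    rcases hr with h | ⟨c, hc, hne⟩
    · simp [h]
    · subst hc
      cases i with
      | zero => simp; exact fun h => hne h
      | succ m => simp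
  unfold occ3
  rw [getE, getE, getE]
  constructor
  · rintro ⟨h0, h1, h2⟩
    by_cases hj : j + 3 ≤ l.length
    · left
      rw [if_pos (by omega)] at h0
      rw [if_pos (by omega)] at h1
      rw [if_pos (by omega)] at h2
      exact ⟨h0, h1, h2⟩
    · right
      -- the three positions are not all inside l; show they are all inside the run
      by_cases hjl : j < l.length
      · -- one of the three positions is l.length - 1, carrying a non-'1' — contradiction
        exfalso
        have hL : (l.length - 1) + 1 = l.length := by omega
        have := hl (l.length - 1) hL
        rcases (by omega : j = l.length - 1 ∨ j + 1 = l.length - 1 ∨ j + 2 = l.length - 1) with h | h | h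
        · rw [if_pos (by omega)] at h0; rw [h] at h0; exact this h0
        · rw [if_pos (by omega)] at h1; rw [h] at h1; exact this h1
        · rw [if_pos (by omega)] at h2; rw [h] at h2; exact this h2
      · refine ⟨by omega, ?_⟩
        -- j + 2 must still be inside the run, else it hits rest (≠ '1') or beyond
        by_contra hcon
        rw [if_neg (by omega), if_neg (by omega)] at h2
        exact hrest _ h2
  · rintro (⟨h0, h1, h2⟩ | ⟨hge, hlt⟩)
    · have e0 : j < l.length := by
        rcases List.getElem?_eq_some_iff.mp h2 with ⟨hh, -⟩; omega
      refine ⟨?_, ?_, ?_⟩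
      · rw [if_pos (by omega)]; exact h0
      · rw [if_pos (by rcases List.getElem?_eq_some_iff.mp h2 with ⟨hh, -⟩; omega)]; exact h1
      · rw [if_pos (by rcases List.getElem?_eq_some_iff.mp h2 with ⟨hh, -⟩; omega)]; exact h2
    · refine ⟨?_, ?_, ?_⟩ <;> rw [if_neg (by omega), if_pos (by omega)]

-- ===== characterizations of Python's find / rfind =====

theorem occ_iff (st : List Char) (j : Nat) :
    (['1', '1', '1'] <+: st.drop j) ↔ occ3 st j := by
  unfold occ3
  constructor
  · rintro ⟨t, ht⟩
    have e0 : (st.drop j)[0]? = some '1' := by rw [← ht]; simp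
    have e1 : (st.drop j)[1]? = some '1' := by rw [← ht]; simp
    have e2 : (st.drop j)[2]? = some '1' := by rw [← ht]; simp
    rw [List.getElem?_drop] at e0 e1 e2
    exact ⟨by simpa using e0, by simpa using e1, by simpa using e2⟩
  · rintro ⟨h0, h1, h2⟩
    have e0 : (st.drop j)[0]? = some '1' := by rw [List.getElem?_drop]; simpa using h0
    have e1 : (st.drop j)[1]? = some '1' := by rw [List.getElem?_drop]; simpa using h1
    have e2 : (st.drop j)[2]? = some '1' := by rw [List.getElem?_drop]; simpa using h2
    match hd : st.drop j with
    | [] => rw [hd] at e0; simp at e0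
    | [a] => rw [hd] at e1; simp at e1
    | [a, b] => rw [hd] at e2; simp at e2
    | a :: b :: c :: t =>
      rw [hd] at e0 e1 e2
      simp at e0 e1 e2
      subst e0; subst e1; subst e2
      exact ⟨t, rfl⟩

theorem exists_occ_iff_infix (st : List Char) :
    (∃ j, ['1', '1', '1'] <+: st.drop j) ↔ ['1', '1', '1'] <:+: st := by
  rw [← PySem.Chars.isIn_iff_infix, ← PySem.Chars.exists_prefix_drop_iff_isIn]

theorem find_of_TripleInv (st : List Char) (v : Int) (h : TripleInv st v) :
    PySem.Chars.find st ['1', '1', '1'] = v := by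
  rcases h with ⟨hv, hno⟩ | ⟨k, hv, hocc, hmin⟩
  · rw [hv, PySem.Chars.find_eq_neg_one_iff, ← exists_occ_iff_infix]
    rintro ⟨j, hj⟩
    exact hno j ((occ_iff st j).mp hj)
  · have hinf : ['1', '1', '1'] <:+: st :=
      (exists_occ_iff_infix st).mp ⟨k, (occ_iff st k).mpr hocc⟩
    have hge : 0 ≤ PySem.Chars.find st ['1', '1', '1'] := by
      rw [PySem.Chars.find_nonneg_iff]; exact hinf
    obtain ⟨hpre, hfmin⟩ := PySem.Chars.find_spec hge
    have hn1 : ¬ k < (PySem.Chars.find st ['1', '1', '1']).toNat :=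
      fun hlt => hfmin k hlt ((occ_iff st k).mpr hocc)
    have hn2 : ¬ (PySem.Chars.find st ['1', '1', '1']).toNat < k :=
      fun hlt => hmin _ hlt ((occ_iff st _).mp hpre)
    rw [hv]
    omega

-- rfind via an explicit downward scan (rfind.go has no library spec lemma)
def lastZeroUpto (st : List Char) : Nat → Int
  | 0 => -1
  | j + 1 => if st[j]? = some '0' then (j : Int) else lastZeroUpto st j

theorem prefix1_iff (c : Char) (m : List Char) : ([c] <+: m) ↔ m[0]? = some c := by
  cases m with
  | nil => simp
  | cons a t => simp [List.cons_prefix_cons, eq_comm]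

theorem lastZero_go (st : List Char) (j : Nat) :
    PySem.Chars.rfind.go st ['0'] j =
      if st[j]? = some '0' then (j : Int) else lastZeroUpto st j := by
  induction j with
  | zero =>
    rw [PySem.Chars.rfind.go]
    rw [lastZeroUpto]
    rcases st with _ | ⟨a, t⟩
    · simp
    · simp only [List.isPrefixOf, List.getElem?_cons_zero]
      by_cases h : a = '0'
      · simp [h]
      · simp [h]
        exact fun hh => h hh.symm
  | succ j ih =>
    rw [PySem.Chars.rfind.go, ih, lastZeroUpto]
    have hp : (['0'].isPrefixOf (st.drop (j + 1))) = true ↔ st[j + 1]? = some '0' := by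
      rw [List.isPrefixOf_iff_prefix, prefix1_iff]
      simp [List.getElem?_drop]
    by_cases hc : st[j + 1]? = some '0'
    · rw [if_pos (hp.mpr hc), if_pos hc]
    · rw [if_neg (fun hh => hc (hp.mp hh)), if_neg hc]

theorem lastZero_eq (st : List Char) :
    PySem.Chars.rfind st ['0'] = lastZeroUpto st st.length := by
  rw [PySem.Chars.rfind, lastZero_go]
  rw [if_neg (by simp)]

theorem lastZeroUpto_of_no (st : List Char) (n : Nat) (h : ∀ j : Nat, st[j]? ≠ some '0') :
    lastZeroUpto st n = -1 := by
  induction n with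
  | zero => rfl
  | succ m ih => rw [lastZeroUpto, if_neg (h m), ih]

theorem lastZeroUpto_of_last (st : List Char) (k n : Nat) (hkn : k < n)
    (hk : st[k]? = some '0') (hafter : ∀ j : Nat, k < j → st[j]? ≠ some '0') :
    lastZeroUpto st n = (k : Int) := by
  induction n with
  | zero => omega
  | succ m ih =>
    rw [lastZeroUpto]
    by_cases hm : m = k
    · rw [hm, if_pos hk]
    · rw [if_neg (hafter m (by omega))]
      exact ih (by omega)

theorem rfind_of_ZeroInv (st : List Char) (v : Int) (h : ZeroInv st v) :
    PySem.Chars.rfind st ['0'] = v := by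
  rw [lastZero_eq]
  rcases h with ⟨hv, hno⟩ | ⟨k, hv, hk, hafter⟩
  · rw [hv]; exact lastZeroUpto_of_no st _ hno
  · rw [hv]
    exact lastZeroUpto_of_last st k _ (List.getElem?_eq_some_iff.mp hk).1 hk hafter

-- ===== the invariant is preserved by one step =====

theorem baseOf_step (b : BSt) (c : Char) (h1 : c ≠ '1') (h2 : ¬ (c = '0' ∧ 2 ≤ b.ones)) :
    baseOf (solutionStepB b c) = baseOf b ++ (List.replicate b.ones '1' ++ [c]) := by
  unfold solutionStepB
  rw [if_neg h1, if_neg h2]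
  unfold baseOf
  by_cases ho : b.ones ≠ 0
  · simp [ho]
  · simp at ho
    simp [ho]

theorem inv_step (a : Nat × List Char) (b : BSt) (c : Char) (h : ABInv a b) :
    ABInv (solutionStepA a c) (solutionStepB b c) := by
  obtain ⟨hc, hs, hb, hl, ht, hz⟩ := h
  by_cases h1 : c = '1'
  · -- push a '1': A appends, B bumps the run counter
    have hA : solutionStepA a c = (a.1, a.2 ++ [c]) := by
      unfold solutionStepA
      rw [if_neg (by rintro ⟨hh, -⟩; rw [h1] at hh; exact absurd hh (by decide))]
    have hB : solutionStepB b c = { b with ones := b.ones + 1 } := by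
      unfold solutionStepB; rw [if_pos h1]
    rw [hA, hB]
    have hbase : baseOf { b with ones := b.ones + 1 } = baseOf b := rfl
    refine ⟨hc, ?_, hb, hl, ht, hz⟩
    simp only [hbase, hs, h1, List.replicate_succ' ]
    simp
  · by_cases h2 : c = '0' ∧ 2 ≤ b.ones
    · -- cancel "110": A pops twice, B does arithmetic on the counter
      have hcond : PySem.List.slice a.2 (some (-2)) none = ['1', '1'] := by
        rw [PySem.List.slice_from_neg_ofNat a.2 2 (by omega), hs]
        have hlen : (baseOf b ++ List.replicate b.ones '1').length = (baseOf b).length + b.ones := by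
          simp
        rw [hlen, List.drop_append, List.drop_replicate,
          List.drop_eq_nil_of_le (by omega : (baseOf b).length ≤ (baseOf b).length + b.ones - 2)]
        rw [show b.ones - ((baseOf b).length + b.ones - 2 - (baseOf b).length) = 2 by omega]
        rfl
      have hA : solutionStepA a c = (a.1 + 1, PySem.List.slice a.2 none (some (-2))) := by
        unfold solutionStepA
        rw [if_pos ⟨h2.1, hcond⟩]
      have hB : solutionStepB b c = { b with cnt := b.cnt + 1, ones := b.ones - 2 } := by
        unfold solutionStepB; rw [if_neg h1, if_pos h2]
      rw [hA, hB]
      refine ⟨by simp [hc], ?_, hb, hl, ht, hz⟩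
      show PySem.List.slice a.2 none (some (-2)) = baseOf b ++ List.replicate (b.ones - 2) '1'
      rw [PySem.List.slice_to_neg_ofNat a.2 2 (by omega), hs]
      have hlen : (baseOf b ++ List.replicate b.ones '1').length = (baseOf b).length + b.ones := by
        simp
      have ho2 : 2 ≤ b.ones := h2.2
      rw [hlen, List.take_append, List.take_replicate,
        List.take_of_length_le (show (baseOf b).length ≤ (baseOf b).length + b.ones - 2 by omega)]
      congr 2
      omega
    · -- flush: A appends c, B flushes the run and c into pieces and updates the indices
      have hcnot : ¬ (c = '0' ∧ PySem.List.slice a.2 (some (-2)) none = ['1', '1']) := by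
        rintro ⟨hc0, hsl⟩
        have hones : b.ones ≤ 1 := by
          by_contra hh
          exact h2 ⟨hc0, by omega⟩
        rw [PySem.List.slice_from_neg_ofNat a.2 2 (by omega), hs] at hsl
        have hlen : (baseOf b ++ List.replicate b.ones '1').length = (baseOf b).length + b.ones := by
          simp
        -- the dropped list equals ['1','1']; read off its second-to-last element
        have hg : ∀ i, (baseOf b ++ List.replicate b.ones '1')[((baseOf b).length + b.ones - 2) + i]? = ['1', '1'][i]? := by
          intro i
          rw [← List.getElem?_drop, ← hlen, hsl]
        -- total length ≥ 2
        have hlen2 : 2 ≤ (baseOf b).length + b.ones := by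
          have h := congrArg List.length hsl
          rw [List.length_drop] at h
          simp only [List.length_append, List.length_replicate, List.length_cons,
            List.length_nil] at h
          omega
        -- position length-2 must be '1'
        rcases Nat.lt_or_ge b.ones 1 with ho0 | ho1
        · -- ones = 0: position length-1 is last of base, must be '1'
          have h1g := hg 1
          have : (baseOf b)[(baseOf b).length - 1]? = some '1' := by
            rw [← List.getElem?_append_left (l₂ := List.replicate b.ones '1') (by omega)]
            have e : (baseOf b).length + b.ones - 2 + 1 = (baseOf b).length - 1 := by omega
            rw [← e]
            simpa using h1g
          exact hl _ (by omega) this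
        · -- ones = 1: position length-2 is last of base, must be '1'
          have hones1 : b.ones = 1 := by omega
          have h0g := hg 0
          have : (baseOf b)[(baseOf b).length - 1]? = some '1' := by
            rw [← List.getElem?_append_left (l₂ := List.replicate b.ones '1') (by omega)]
            have e : (baseOf b).length + b.ones - 2 + 0 = (baseOf b).length - 1 := by omega
            rw [← e]
            simpa using h0g
          exact hl _ (by omega) this
      have hA : solutionStepA a c = (a.1, a.2 ++ [c]) := by
        unfold solutionStepA
        rw [if_neg hcnot]
      have hbase := baseOf_step b c h1 h2
      have hocc := occ3_ext (baseOf b) b.ones [c] hl (Or.inr ⟨c, rfl, h1⟩)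
      have hBc : (solutionStepB b c).cnt = b.cnt := by
        unfold solutionStepB; rw [if_neg h1, if_neg h2]
      have hBo : (solutionStepB b c).ones = 0 := by
        unfold solutionStepB; rw [if_neg h1, if_neg h2]
      have hBb : (solutionStepB b c).blen = b.blen + b.ones + 1 := by
        unfold solutionStepB; rw [if_neg h1, if_neg h2]
      have hBt : (solutionStepB b c).triple =
          if b.triple = -1 ∧ 3 ≤ b.ones then (b.blen : Int) else b.triple := by
        unfold solutionStepB; rw [if_neg h1, if_neg h2]
      have hBz : (solutionStepB b c).zero =
          if c = '0' then ((b.blen + b.ones + 1 : Nat) : Int) - 1 else b.zero := by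
        unfold solutionStepB; rw [if_neg h1, if_neg h2]
      have hlen' : (baseOf (solutionStepB b c)).length = (baseOf b).length + b.ones + 1 := by
        rw [hbase]
        simp only [List.length_append, List.length_replicate, List.length_cons, List.length_nil]
        omega
      refine ⟨by rw [hA, hBc]; exact hc, ?_, ?_, ?_, ?_, ?_⟩
      · -- stack shape
        rw [hA, hBo, hbase]
        simp [hs]
      · rw [hBb, hlen', hb]
      · -- new base ends with c ≠ '1'
        intro j hj
        rw [hbase]
        have hjv : j = (baseOf b).length + b.ones := by
          rw [hlen'] at hj
          omega
        rw [getE, if_neg (by omega), if_neg (by omega)]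
        rw [show j - (baseOf b).length - b.ones = 0 by omega]
        simp
        exact fun hh => h1 hh
      · -- TripleInv preserved / extended
        rw [hBt, hbase]
        by_cases hcase : b.triple = -1 ∧ 3 ≤ b.ones
        · rw [if_pos hcase]
          right
          refine ⟨(baseOf b).length, by rw [hb], ?_, ?_⟩
          · rw [hocc]
            right
            omega
          · intro j hj
            rw [hocc]
            rintro (hoc | ⟨hge, -⟩)
            · rcases ht with ⟨-, hno⟩ | ⟨k, hk, -, -⟩
              · exact hno j hoc
              · rw [hcase.1] at hk; omega
            · omega
        · rw [if_neg hcase]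
          rcases ht with ⟨hv, hno⟩ | ⟨k, hk, hoc, hmin⟩
          · left
            refine ⟨hv, ?_⟩
            intro j
            rw [hocc]
            rintro (hoc | ⟨hge, hlt⟩)
            · exact hno j hoc
            · exact hcase ⟨hv, by omega⟩
          · right
            refine ⟨k, hk, by rw [hocc]; exact Or.inl hoc, ?_⟩
            intro j hj
            rw [hocc]
            rintro (h | ⟨hge, -⟩)
            · exact hmin j hj h
            · -- j ≥ |base| but j < k and occ3 base k forces k + 3 ≤ |base|
              obtain ⟨-, -, hk2⟩ := hoc
              rcases List.getElem?_eq_some_iff.mp hk2 with ⟨hh, -⟩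
              omega
      · -- ZeroInv preserved / extended
        rw [hBz, hbase]
        have hget := getE (baseOf b) [c] b.ones
        by_cases hc0 : c = '0'
        · rw [if_pos hc0]
          right
          refine ⟨(baseOf b).length + b.ones, by rw [hb]; push_cast; ring, ?_, ?_⟩
          · rw [hget, if_neg (by omega), if_neg (by omega)]
            simp [hc0]
          · intro j hj
            rw [hget, if_neg (by omega), if_neg (by omega)]
            rw [List.getElem?_eq_none (by simp; omega)]
            simp
        · rw [if_neg hc0]
          have hnew : ∀ j, (baseOf b).length ≤ j →
              (baseOf b ++ (List.replicate b.ones '1' ++ [c]))[j]? ≠ some '0' := by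
            intro j hj
            rw [hget, if_neg (by omega)]
            by_cases hlt : j < (baseOf b).length + b.ones
            · rw [if_pos hlt]; simp
            · rw [if_neg hlt]
              cases he : ([c])[j - (baseOf b).length - b.ones]? with
              | none => simp
              | some x =>
                have : x = c := by
                  cases hj2 : j - (baseOf b).length - b.ones with
                  | zero => rw [hj2] at he; simpa using he.symm
                  | succ m => rw [hj2] at he; simp at he
                rw [this]
                simp
                exact fun hh => hc0 hh
          rcases hz with ⟨hv, hno⟩ | ⟨k, hk, hk0, hafter⟩
          · left
            refine ⟨hv, ?_⟩
            intro j
            by_cases hj : j < (baseOf b).length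
            · rw [hget, if_pos hj]; exact hno j
            · exact hnew j (by omega)
          · right
            have hklt : k < (baseOf b).length := (List.getElem?_eq_some_iff.mp hk0).1
            refine ⟨k, hk, by rw [hget, if_pos hklt]; exact hk0, ?_⟩
            intro j hj
            by_cases hjl : j < (baseOf b).length
            · rw [hget, if_pos hjl]; exact hafter j hj
            · exact hnew j (by omega)

theorem inv_fold (cs : List Char) :
    ABInv (cs.foldl solutionStepA (0, [])) (cs.foldl solutionStepB ⟨0, 0, [], 0, -1, -1⟩) := by
  have base : ABInv (0, ([] : List Char)) ⟨0, 0, [], 0, -1, -1⟩ := by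
    refine ⟨rfl, rfl, rfl, by intro j hj; simp [baseOf] at hj, Or.inl ⟨rfl, ?_⟩, Or.inl ⟨rfl, ?_⟩⟩
    · intro j h
      obtain ⟨h0, -⟩ := h
      simp [baseOf] at h0
    · intro j
      simp [baseOf]
  have gen : ∀ (a : Nat × List Char) (b : BSt), ABInv a b →
      ABInv (cs.foldl solutionStepA a) (cs.foldl solutionStepB b) := by
    induction cs with
    | nil => intro a b h; exact h
    | cons c t ih =>
      intro a b h
      exact ih _ _ (inv_step a b c h)
  exact gen _ _ base

-- ===== per-string equality =====

theorem one_eq (t : String) : solutionOneA t = solutionOneB t := by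
  obtain ⟨hc, hs, hb, hl, ht, hz⟩ := inv_fold t.toList
  unfold solutionOneA solutionOneB
  set a := t.toList.foldl solutionStepA (0, []) with ha
  set b := t.toList.foldl solutionStepB ⟨0, 0, [], 0, -1, -1⟩ with hbdef
  dsimp only
  have hjoin : (PySem.Str.join "" b.pieces).toList = baseOf b := by
    simp [PySem.Str.toList_join, join_nil_flatten, baseOf]
  -- occurrences of "111" in the whole reduced stack
  have hocc : ∀ j : Nat, occ3 (baseOf b ++ List.replicate b.ones '1') j ↔
      (occ3 (baseOf b) j ∨ ((baseOf b).length ≤ j ∧ j + 3 ≤ (baseOf b).length + b.ones)) := by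
    have h := occ3_ext (baseOf b) b.ones [] hl (Or.inl rfl)
    simpa using h
  have hget : ∀ i : Nat, (baseOf b ++ List.replicate b.ones '1')[i]? =
      if i < (baseOf b).length then (baseOf b)[i]?
      else if i < (baseOf b).length + b.ones then some '1' else none := by
    intro i
    have h := getE (baseOf b) [] b.ones i
    simpa using h
  have hstack3 : TripleInv a.2
      (if b.triple ≠ -1 then b.triple else if 3 ≤ b.ones then (b.blen : Int) else -1) := by
    rw [hs]
    by_cases h1 : b.triple ≠ -1
    · rw [if_pos h1]
      rcases ht with ⟨hv, -⟩ | ⟨k, hk, hoc, hmin⟩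
      · exact absurd hv h1
      · right
        refine ⟨k, hk, (hocc k).mpr (Or.inl hoc), ?_⟩
        intro j hj
        rw [hocc]
        rintro (h | ⟨hge, -⟩)
        · exact hmin j hj h
        · obtain ⟨-, -, hk2⟩ := hoc
          rcases List.getElem?_eq_some_iff.mp hk2 with ⟨hh, -⟩
          omega
    · simp at h1
      rcases ht with ⟨-, hno⟩ | ⟨k, hk, -, -⟩
      · rw [if_neg (by simp [h1])]
        by_cases h3 : 3 ≤ b.ones
        · rw [if_pos h3]
          right
          refine ⟨(baseOf b).length, by rw [hb], ?_, ?_⟩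
          · rw [hocc]
            right
            omega
          · intro j hj
            rw [hocc]
            rintro (h | ⟨hge, -⟩)
            · exact hno j h
            · omega
        · rw [if_neg h3]
          left
          refine ⟨rfl, ?_⟩
          intro j
          rw [hocc]
          rintro (h | ⟨hge, hlt⟩)
          · exact hno j h
          · omega
      · rw [h1] at hk; omega
  have hfind := find_of_TripleInv _ _ hstack3
  -- last '0' of the whole reduced stack
  have hstackz : ZeroInv a.2 b.zero := by
    rw [hs]
    rcases hz with ⟨hv, hno⟩ | ⟨k, hk, hk0, hafter⟩
    · left
      refine ⟨hv, ?_⟩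
      intro j
      rw [hget]
      by_cases hj : j < (baseOf b).length
      · rw [if_pos hj]; exact hno j
      · rw [if_neg hj]
        by_cases hj2 : j < (baseOf b).length + b.ones
        · rw [if_pos hj2]; simp
        · rw [if_neg hj2]; simp
    · right
      have hklt : k < (baseOf b).length := (List.getElem?_eq_some_iff.mp hk0).1
      refine ⟨k, hk, by rw [hget, if_pos hklt]; exact hk0, ?_⟩
      intro j hj
      rw [hget]
      by_cases hjl : j < (baseOf b).length
      · rw [if_pos hjl]; exact hafter j hj
      · rw [if_neg hjl]
        by_cases hj2 : j < (baseOf b).length + b.ones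
        · rw [if_pos hj2]; simp
        · rw [if_neg hj2]; simp
  have hrfind := rfind_of_ZeroInv _ _ hstackz
  -- the assembled strings agree for any cut 0 ≤ p ≤ |base|
  have hassemble : ∀ p : Int, 0 ≤ p → p.toNat ≤ (baseOf b).length →
      PySem.List.slice a.2 none (some p) ++ (List.replicate a.1 ['1', '1', '0']).flatten ++
        PySem.List.slice a.2 (some p) none =
      PySem.List.slice (PySem.Str.join "" b.pieces).toList none (some p) ++
        (List.replicate b.cnt ['1', '1', '0']).flatten ++
        PySem.List.slice (PySem.Str.join "" b.pieces).toList (some p) none ++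
        List.replicate b.ones '1' := by
    intro p hp hple
    rw [hjoin, hc, hs, PySem.List.slice_to _ hp, PySem.List.slice_to _ hp,
      PySem.List.slice_from _ hp, PySem.List.slice_from _ hp,
      List.take_append, List.drop_append,
      show p.toNat - (baseOf b).length = 0 by omega]
    simp
  by_cases h1 : b.triple ≠ -1
  · rcases ht with ⟨hv, -⟩ | ⟨k, hk, hoc, -⟩
    · exact absurd hv h1
    · have hk3 : k + 3 ≤ (baseOf b).length := by
        obtain ⟨-, -, hk2⟩ := hoc
        rcases List.getElem?_eq_some_iff.mp hk2 with ⟨hh, -⟩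
        omega
      have hfind' : PySem.Chars.find a.2 ['1', '1', '1'] = b.triple := by
        rw [hfind, if_pos h1]
      have hposB : (if b.triple ≠ -1 then b.triple
          else if 3 ≤ b.ones then (b.blen : Int) else b.zero + 1) = b.triple := if_pos h1
      rw [hfind', hposB, if_neg h1]
      exact congrArg _ (hassemble b.triple (by rw [hk]; positivity)
        (by rw [hk]; simp; omega))
  · by_cases h3 : 3 ≤ b.ones
    · have hfind' : PySem.Chars.find a.2 ['1', '1', '1'] = (b.blen : Int) := by
        rw [hfind, if_neg h1, if_pos h3]
      have hposB : (if b.triple ≠ -1 then b.triple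
          else if 3 ≤ b.ones then (b.blen : Int) else b.zero + 1) = (b.blen : Int) := by
        rw [if_neg h1, if_pos h3]
      rw [hfind', hposB, if_neg (show ¬ ((b.blen : Int) = -1) by omega)]
      exact congrArg _ (hassemble (b.blen : Int) (by positivity) (by rw [hb]; simp))
    · have hfind' : PySem.Chars.find a.2 ['1', '1', '1'] = -1 := by
        rw [hfind, if_neg h1, if_neg h3]
      have hposB : (if b.triple ≠ -1 then b.triple
          else if 3 ≤ b.ones then (b.blen : Int) else b.zero + 1) = b.zero + 1 := by
        rw [if_neg h1, if_neg h3]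
      rw [hfind', hposB, if_pos rfl, hrfind]
      have hzb : 0 ≤ b.zero + 1 ∧ (b.zero + 1).toNat ≤ (baseOf b).length := by
        rcases hz with ⟨hv, -⟩ | ⟨k, hk, hk0, -⟩
        · rw [hv]; simp
        · have hklt : k < (baseOf b).length := (List.getElem?_eq_some_iff.mp hk0).1
          rw [hk]
          refine ⟨by positivity, ?_⟩
          simp
          omega
      exact congrArg _ (hassemble (b.zero + 1) hzb.1 hzb.2)

-- ===== VERDICT (by name: the statement is the Claim_ definition above) =====
theorem solution_spec : Claim_equal_solution := by
  intro s _
  unfold Spec_solution solution solution_alt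
  simp [one_eq]
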